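-- pv_equiv track=rewrite | github.com/C0SS10/MiniProyectos | Lenguaje/afd/Constantes.py | reconocerNumericos
-- ===== SOURCE A (Python) =====
-- def reconocerNumericos(entrada):
--     estado = 0
--     signo = 1
--     for char in entrada:
--         if estado == 0:
--             if char == '-':
--                 signo = -1
--                 estado = 1
--             elif char == '+':
--                 estado = 1
--             elif char.isdigit():
--                 estado = 2
--             else:
--                 return False
--         elif estado == 1:
--             if char.isdigit():
--                 estado = 2
--             else:
--                 return False
--         elif estado == 2:
--             if char.isdigit():
--                 estado = 2
--             elif char == '.':
--                 estado = 3
--             elif char in ['e', 'E']: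
--                 estado = 5
--             else:
--                 return True
--         elif estado == 3:
--             if char.isdigit():
--                 estado = 4
--             else:
--                 return False
--         elif estado == 4:
--             if char.isdigit():
--                 estado = 4
--             elif char in ['e', 'E']:
--                 estado = 5
--             else:
--                 return True
--         elif estado == 5:
--             if char in ['+', '-']:
--                 estado = 6
--             elif char.isdigit():
--                 estado = 7
--             else:
--                 return False
--         elif estado == 6:
--             if char.isdigit():
--                 estado = 7
--             else:
--                 return False
--         elif estado == 7:
--             if char.isdigit():
--                 estado = 7
--             else:
--                 return True
--     if estado in [2, 4, 7]:
--         return True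
--     return False
-- ===== SOURCE B (Python) =====
-- # Staged recursive-descent scan: sign, integer digits, optional fraction, optional
-- # exponent; each stage consumes a suffix, later junk is ignored (A's prefix-accept).
--
-- def _sin_digitos(cs):
--     """Drop the leading run of digit characters, return the remaining suffix."""
--     i = 0
--     while i < len(cs) and cs[i].isdigit():
--         i += 1
--     return cs[i:]
--
--
-- def _signo(cs):
--     """Consume one optional leading '+' or '-'."""
--     return cs[1:] if cs[:1] in ('+', '-') else cs
--
--
-- def _entero(cs):
--     """Consume a non-empty digit run; None if there is none."""
--     resto = _sin_digitos(cs)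
--     return None if len(resto) == len(cs) else resto
--
--
-- def _fraccion(resto):
--     """Consume '.<digits>' if a '.' is next; None if the '.' has no digit after it."""
--     if resto[:1] == '.':
--         return _entero(resto[1:])
--     return resto
--
--
-- def _exponente(resto):
--     """Consume 'e|E [sign] <digits>' if an e/E is next; None on a malformed exponent."""
--     if resto[:1] in ('e', 'E'):
--         return _entero(_signo(resto[1:]))
--     return resto
--
--
-- def reconocerNumericos(entrada):
--     resto = _entero(_signo(entrada))
--     if resto is None:
--         return False
--     resto = _fraccion(resto)
--     if resto is None:
--         return False
--     return _exponente(resto) is not None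
-- ===== Notes on version B (the rewrite author's own statement) =====
-- stated objective: simpler
-- what changed: Replaced the single-pass eight-state DFA loop with a staged recursive-descent scan (optional sign, required digit run, optional '.digits' fraction, optional 'e[sign]digits' exponent), each stage consuming a suffix and anything after a completed stage being accepted.
import Mathlib
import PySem

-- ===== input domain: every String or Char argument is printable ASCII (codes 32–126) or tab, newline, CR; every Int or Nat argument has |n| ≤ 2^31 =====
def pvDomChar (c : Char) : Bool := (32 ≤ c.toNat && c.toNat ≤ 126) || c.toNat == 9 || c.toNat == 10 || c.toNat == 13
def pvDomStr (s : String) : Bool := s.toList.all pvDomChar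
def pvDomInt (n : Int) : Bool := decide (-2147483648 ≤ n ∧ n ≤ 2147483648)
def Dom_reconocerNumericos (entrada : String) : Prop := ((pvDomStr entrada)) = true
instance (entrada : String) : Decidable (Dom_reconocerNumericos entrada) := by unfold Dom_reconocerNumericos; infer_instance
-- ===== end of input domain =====

-- B replaces A's eight-state DFA loop by a staged recursive-descent scan
-- (sign, digit run, optional fraction, optional exponent); objective: simpler.

-- ===== PORT A =====
-- A's loop: state, sign accumulator, per-state if/elif chains, early returns.
def pvLoopA : Nat → Int → List Char → Bool
  | estado, _, [] => estado == 2 || estado == 4 || estado == 7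
  | estado, signo, char :: rest =>
    if estado == 0 then
      if char == '-' then pvLoopA 1 (-1) rest
      else if char == '+' then pvLoopA 1 signo rest
      else if PySem.Chars.isdigit char then pvLoopA 2 signo rest
      else false
    else if estado == 1 then
      if PySem.Chars.isdigit char then pvLoopA 2 signo rest
      else false
    else if estado == 2 then
      if PySem.Chars.isdigit char then pvLoopA 2 signo rest
      else if char == '.' then pvLoopA 3 signo rest
      else if char == 'e' || char == 'E' then pvLoopA 5 signo rest
      else true
    else if estado == 3 then
      if PySem.Chars.isdigit char then pvLoopA 4 signo rest
      else false
    else if estado == 4 then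
      if PySem.Chars.isdigit char then pvLoopA 4 signo rest
      else if char == 'e' || char == 'E' then pvLoopA 5 signo rest
      else true
    else if estado == 5 then
      if char == '+' || char == '-' then pvLoopA 6 signo rest
      else if PySem.Chars.isdigit char then pvLoopA 7 signo rest
      else false
    else if estado == 6 then
      if PySem.Chars.isdigit char then pvLoopA 7 signo rest
      else false
    else if estado == 7 then
      if PySem.Chars.isdigit char then pvLoopA 7 signo rest
      else true
    else
      pvLoopA estado signo rest

def reconocerNumericos (entrada : String) : Bool :=
  pvLoopA 0 1 entrada.toList

-- ===== PORT B =====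
-- _sin_digitos: the index-advancing while loop, as suffix recursion
def pvSinDigitos : List Char → List Char
  | [] => []
  | c :: rest => if PySem.Chars.isdigit c then pvSinDigitos rest else c :: rest

-- _signo: consume one optional leading '+' or '-'
def pvSigno (cs : List Char) : List Char :=
  match cs with
  | c :: rest => if c == '+' || c == '-' then rest else cs
  | [] => cs

-- _entero: a non-empty digit run, none if there is none
def pvEntero (cs : List Char) : Option (List Char) :=
  let resto := pvSinDigitos cs
  if resto.length == cs.length then none else some resto

-- _fraccion: '.<digits>' if a '.' is next
def pvFraccion (resto : List Char) : Option (List Char) :=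
  match resto with
  | c :: rest => if c == '.' then pvEntero rest else some resto
  | [] => some resto

-- _exponente: 'e|E [sign] <digits>' if an e/E is next
def pvExponente (resto : List Char) : Option (List Char) :=
  match resto with
  | c :: rest => if c == 'e' || c == 'E' then pvEntero (pvSigno rest) else some resto
  | [] => some resto

def reconocerNumericos_alt (entrada : String) : Bool :=
  match pvEntero (pvSigno entrada.toList) with
  | none => false
  | some resto =>
    match pvFraccion resto with
    | none => false
    | some resto2 => (pvExponente resto2).isSome

-- ===== PRECONDITION & SPEC =====
def Spec_reconocerNumericos (entrada : String) (out : Bool) : Prop := out = reconocerNumericos_alt entrada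
instance (entrada : String) (out : Bool) : Decidable (Spec_reconocerNumericos entrada out) := by unfold Spec_reconocerNumericos; infer_instance

-- ===== CLAIM (what is proved, stated in full; the proofs are below) =====
def Claim_equal_reconocerNumericos : Prop := ∀ (entrada : String), Dom_reconocerNumericos entrada → Spec_reconocerNumericos entrada (reconocerNumericos entrada)

-- ===== LEMMAS AND PROOFS =====
-- does the suffix start with a digit?
def pvStartsDigit (cs : List Char) : Bool :=
  match cs with
  | c :: _ => PySem.Chars.isdigit c
  | [] => false

lemma pvSinDigitos_len_le (cs : List Char) : (pvSinDigitos cs).length ≤ cs.length := by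
  induction cs with
  | nil => simp [pvSinDigitos]
  | cons c rest ih =>
    simp only [pvSinDigitos]
    split
    · simp; omega
    · simp

lemma pvEntero_eq (cs : List Char) :
    pvEntero cs = if pvStartsDigit cs then some (pvSinDigitos cs) else none := by
  cases cs with
  | nil => rfl
  | cons c rest =>
    by_cases hd : PySem.Chars.isdigit c = true
    · have := pvSinDigitos_len_le rest
      simp only [pvEntero, pvSinDigitos, pvStartsDigit, hd, if_pos]
      simp
      omega
    · simp [pvEntero, pvSinDigitos, pvStartsDigit, hd]

lemma pvLoopA_seven (cs : List Char) (s : Int) : pvLoopA 7 s cs = true := by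
  induction cs generalizing s with
  | nil => rfl
  | cons c rest ih =>
    simp only [pvLoopA]
    split <;> simp_all

lemma pvLoopA_six (cs : List Char) (s : Int) : pvLoopA 6 s cs = pvStartsDigit cs := by
  cases cs with
  | nil => rfl
  | cons c rest =>
    simp only [pvLoopA, pvStartsDigit]
    split <;> simp_all [pvLoopA_seven]

lemma pvLoopA_five (cs : List Char) (s : Int) : pvLoopA 5 s cs = pvStartsDigit (pvSigno cs) := by
  cases cs with
  | nil => rfl
  | cons c rest =>
    by_cases hs : (c == '+' || c == '-') = true
    · have hs' : (c == '+' || c == '-') = true := hs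
      simp only [pvLoopA, pvSigno, hs']
      have : c ≠ '0' ∧ c ≠ '1' ∧ c ≠ '2' ∧ c ≠ '3' ∧ c ≠ '4' ∧ c ≠ '5' ∧ c ≠ '6' ∧ c ≠ '7' ∧ c ≠ '8' ∧ c ≠ '9' := by
        rcases Bool.or_eq_true_iff.mp hs with h | h <;>
          · have := beq_iff_eq.mp h; subst this; refine ⟨?_, ?_, ?_, ?_, ?_, ?_, ?_, ?_, ?_, ?_⟩ <;> decide
      simp [pvLoopA_six]
    · have hs' : (c == '+' || c == '-') = false := by simpa using hs
      simp only [pvLoopA, pvSigno, hs']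
      by_cases hd : PySem.Chars.isdigit c = true
      · simp [hd, pvLoopA_seven, pvStartsDigit]
      · simp [hd, pvStartsDigit]

lemma pvLoopA_four (cs : List Char) (s : Int) :
    pvLoopA 4 s cs = (pvExponente (pvSinDigitos cs)).isSome := by
  induction cs generalizing s with
  | nil => rfl
  | cons c rest ih =>
    by_cases hd : PySem.Chars.isdigit c = true
    · simpa [pvLoopA, pvSinDigitos, hd] using ih s
    · by_cases he : (c == 'e' || c == 'E') = true
      · simp only [pvLoopA, pvSinDigitos, pvExponente, hd, he]
        simp [pvLoopA_five, pvEntero_eq, he]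
        split <;> simp_all
      · have he' : (c == 'e' || c == 'E') = false := by simpa using he
        simp [pvLoopA, pvSinDigitos, pvExponente, hd, he']

lemma pvLoopA_three (cs : List Char) (s : Int) :
    pvLoopA 3 s cs = (match pvEntero cs with
                      | none => false
                      | some r => (pvExponente r).isSome) := by
  cases cs with
  | nil => rfl
  | cons c rest =>
    by_cases hd : PySem.Chars.isdigit c = true
    · simp [pvLoopA, pvLoopA_four, pvEntero_eq, pvStartsDigit, pvSinDigitos, hd]
    · simp [pvLoopA, pvEntero_eq, pvStartsDigit, hd]

lemma pvLoopA_two (cs : List Char) (s : Int) :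
    pvLoopA 2 s cs = (match pvFraccion (pvSinDigitos cs) with
                      | none => false
                      | some r => (pvExponente r).isSome) := by
  induction cs generalizing s with
  | nil => rfl
  | cons c rest ih =>
    by_cases hd : PySem.Chars.isdigit c = true
    · simpa [pvLoopA, pvSinDigitos, hd] using ih s
    · by_cases hdot : c = '.'
      · subst hdot
        simp [pvLoopA, pvSinDigitos, pvFraccion, pvLoopA_three, hd]
      · by_cases he : (c == 'e' || c == 'E') = true
        · have hdot' : (c == '.') = false := by simpa using hdot
          simp only [pvLoopA, pvSinDigitos, pvFraccion, pvExponente, hd, he, hdot']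
          simp [pvLoopA_five, pvEntero_eq, he, hdot']
          split <;> simp_all
        · have he' : (c == 'e' || c == 'E') = false := by simpa using he
          have hdot' : (c == '.') = false := by simpa using hdot
          simp [pvLoopA, pvSinDigitos, pvFraccion, pvExponente, hd, he', hdot']

lemma pvLoopA_one (cs : List Char) (s : Int) :
    pvLoopA 1 s cs = (match pvEntero cs with
                      | none => false
                      | some r => match pvFraccion r with
                                  | none => false
                                  | some r2 => (pvExponente r2).isSome) := by
  cases cs with
  | nil => rfl
  | cons c rest =>
    by_cases hd : PySem.Chars.isdigit c = true
    · simp [pvLoopA, pvLoopA_two, pvEntero_eq, pvStartsDigit, pvSinDigitos, hd]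
    · simp [pvLoopA, pvEntero_eq, pvStartsDigit, hd]

lemma pvLoopA_zero (cs : List Char) (s : Int) :
    pvLoopA 0 s cs = (match pvEntero (pvSigno cs) with
                      | none => false
                      | some r => match pvFraccion r with
                                  | none => false
                                  | some r2 => (pvExponente r2).isSome) := by
  cases cs with
  | nil => rfl
  | cons c rest =>
    by_cases hm : c = '-'
    · subst hm; simp [pvLoopA, pvSigno, pvLoopA_one]
    · by_cases hp : c = '+'
      · subst hp; simp [pvLoopA, pvSigno, pvLoopA_one]
      · have hm' : (c == '-') = false := by simpa using hm
        have hp' : (c == '+') = false := by simpa using hp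
        by_cases hd : PySem.Chars.isdigit c = true
        · simp [pvLoopA, pvSigno, hm', hp', hd, pvLoopA_two, pvEntero_eq,
            pvStartsDigit, pvSinDigitos]
        · simp [pvLoopA, pvSigno, hm', hp', hd, pvEntero_eq, pvStartsDigit]

-- ===== VERDICT (by name: the statement is the Claim_ definition above) =====
theorem reconocerNumericos_spec : Claim_equal_reconocerNumericos := by
  intro entrada _
  unfold Spec_reconocerNumericos reconocerNumericos reconocerNumericos_alt
  exact pvLoopA_zero entrada.toList 1
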